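-- pv_equiv track=rewrite | github.com/kolawoledev-eng/campus101_engine | app/features/school_exams/api/routes.py | _difficulty_split
-- ===== SOURCE A (Python) =====
-- def _difficulty_split(total: int) -> list[tuple[str, int]]:
--     base = total // 3
--     rem = total % 3
--     buckets = [("easy", base), ("medium", base), ("hard", base)]
--     for i in range(rem):
--         d, c = buckets[i]
--         buckets[i] = (d, c + 1)
--     return [(d, c) for d, c in buckets if c > 0]
-- ===== SOURCE B (Python) =====
-- def _difficulty_split(total: int) -> list[tuple[str, int]]:
--     # closed form: bucket i gets ceil((total - i) / 3) = (total + 2 - i) // 3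
--     names = ("easy", "medium", "hard")
--     return [(names[i], c) for i in range(3) if (c := (total + 2 - i) // 3) > 0]
-- ===== Notes on version B (the rewrite author's own statement) =====
-- stated objective: alternative
-- what changed: Replaces the equal-buckets-plus-remainder-distribution loop with a direct closed-form ceiling division per bucket.
import Mathlib
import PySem

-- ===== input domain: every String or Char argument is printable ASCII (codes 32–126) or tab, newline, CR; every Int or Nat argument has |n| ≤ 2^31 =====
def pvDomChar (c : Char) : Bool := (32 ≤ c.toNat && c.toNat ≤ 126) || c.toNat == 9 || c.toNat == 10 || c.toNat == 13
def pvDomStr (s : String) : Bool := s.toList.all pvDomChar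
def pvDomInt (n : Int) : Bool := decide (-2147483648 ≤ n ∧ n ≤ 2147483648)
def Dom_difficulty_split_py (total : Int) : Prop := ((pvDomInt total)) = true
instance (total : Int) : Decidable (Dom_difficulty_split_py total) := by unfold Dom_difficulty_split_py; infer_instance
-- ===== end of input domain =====

-- B replaces A's equal-buckets-plus-remainder-distribution loop with a closed-form ceiling division per bucket (alternative, same cost).

-- ===== PORT A =====
def difficulty_split_py (total : Int) : List (String × Int) :=
  let base := PySem.Int.floordiv total 3
  let rem := PySem.Int.mod total 3
  let buckets : List (String × Int) := [("easy", base), ("medium", base), ("hard", base)]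
  let buckets := (PySem.List.pyRange 0 rem 1).foldl (fun bs i =>
    let dc := PySem.List.pyGetD bs i ("", 0)
    PySem.List.pySetD bs i (dc.1, dc.2 + 1)) buckets
  buckets.filter (fun p => decide (p.2 > 0))

-- ===== PORT B =====
def difficulty_split_py_alt (total : Int) : List (String × Int) :=
  let names : List String := ["easy", "medium", "hard"]
  (PySem.List.pyRange 0 3 1).filterMap (fun i =>
    let c := PySem.Int.floordiv (total + 2 - i) 3
    if c > 0 then some (names.getD i.toNat "", c) else none)

-- ===== PRECONDITION & SPEC =====
def Spec_difficulty_split_py (total : Int) (out : List (String × Int)) : Prop := out = difficulty_split_py_alt total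
instance (total : Int) (out : List (String × Int)) : Decidable (Spec_difficulty_split_py total out) := by unfold Spec_difficulty_split_py; infer_instance

-- ===== CLAIM (what is proved, stated in full; the proofs are below) =====
def Claim_equal_difficulty_split_py : Prop := ∀ (total : Int), Dom_difficulty_split_py total → Spec_difficulty_split_py total (difficulty_split_py total)

-- ===== LEMMAS AND PROOFS =====
theorem difficulty_split_eq (total : Int) :
    difficulty_split_py total = difficulty_split_py_alt total := by
  unfold difficulty_split_py difficulty_split_py_alt
  have h3 : (0:Int) < 3 := by norm_num
  simp only [PySem.Int.mod_eq_emod_of_pos h3, PySem.Int.floordiv_eq_ediv_of_pos h3]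
  have hr : total % 3 = 0 ∨ total % 3 = 1 ∨ total % 3 = 2 := by omega
  have e0 : (total + 2) / 3 = total / 3 + (if total % 3 = 0 then 0 else 1) := by omega
  have e1 : (total + 2 - 1) / 3 = total / 3 + (if total % 3 = 2 then 1 else 0) := by omega
  have e2 : (total + 2 - 2) / 3 = total / 3 := by omega
  rcases hr with hr | hr | hr <;> rw [hr] at e0 e1 ⊢ <;> norm_num at e0 e1 <;>
    simp only [PySem.List.pyRange, PySem.List.pyGetD, PySem.List.pyGet?, PySem.List.pyIdx?,
      PySem.List.pySetD, PySem.List.pySet?] <;>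
    norm_num [List.range_succ, List.filterMap_cons, List.filter, e0, e1, e2] <;>
    (by_cases hb : 0 < total / 3 <;> by_cases hb0 : (0:Int) ≤ total / 3 <;>
      simp [show List.range 3 = [0, 1, 2] from rfl, show List.range 2 = [0, 1] from rfl,
        e0, e1, hb, hb0])

-- ===== VERDICT (by name: the statement is the Claim_ definition above) =====
theorem difficulty_split_py_spec : Claim_equal_difficulty_split_py := by
  intro total _
  exact difficulty_split_eq total
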